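-- pv_equiv track=rewrite | github.com/afrikanjoe/Yeet | Facebook/Python/CountingTriangles.py | countDistinctTriangles
-- ===== SOURCE A (Python) =====
-- def countDistinctTriangles(arr):
--   # Write your code here
--   count = 0
--   triangle_list =[]
--   for triangle in arr:
--     tr = sorted(triangle)
--     if(tr not in triangle_list):
--       count+=1
--       triangle_list.append(tr)
--   return count
-- ===== SOURCE B (Python) =====
-- def countDistinctTriangles(arr):
--     triples = sorted(tuple(sorted(t)) for t in arr)
--     count = 0
--     prev = None
--     for t in triples:
--         if prev is None or t != prev:
--             count += 1
--         prev = t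
--     return count
-- ===== Notes on version B (the rewrite author's own statement) =====
-- stated objective: alternative
-- what changed: Replaced the growing seen-list with its linear membership scan by normalising every triangle to a sorted tuple, sorting the tuple list once, and counting boundaries between adjacent distinct tuples in one pass.
import Mathlib
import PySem

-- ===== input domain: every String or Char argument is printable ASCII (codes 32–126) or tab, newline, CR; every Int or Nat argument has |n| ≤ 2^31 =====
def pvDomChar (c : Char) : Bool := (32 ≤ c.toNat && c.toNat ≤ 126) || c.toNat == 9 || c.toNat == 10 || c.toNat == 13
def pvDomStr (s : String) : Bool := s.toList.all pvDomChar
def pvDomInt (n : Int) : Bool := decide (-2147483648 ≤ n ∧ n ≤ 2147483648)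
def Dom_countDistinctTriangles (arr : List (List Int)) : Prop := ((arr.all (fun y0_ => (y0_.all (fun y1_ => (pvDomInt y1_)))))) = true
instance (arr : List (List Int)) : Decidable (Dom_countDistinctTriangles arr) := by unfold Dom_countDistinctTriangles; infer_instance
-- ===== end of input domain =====

-- B normalises each triangle to a sorted triple, sorts the list of triples once,
-- and counts adjacent distinct triples in one pass (alternative: sort+scan
-- instead of A's membership scan over a growing seen-list).


-- ===== PORT A =====
-- A's loop body; state = (count, triangle_list)
def pvAStep (st : Int × List (List Int)) (triangle : List Int) : Int × List (List Int) :=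
  let tr := PySem.List.sorted triangle (fun x => x) false
  if tr ∉ st.2 then (st.1 + 1, st.2 ++ [tr]) else st

def countDistinctTriangles (arr : List (List Int)) : Int :=
  (arr.foldl pvAStep (0, [])).1

-- ===== PORT B =====
-- B's loop body; state = (count, prev : Option)
def pvBStep (st : Int × Option (List Int)) (t : List Int) : Int × Option (List Int) :=
  if st.2 ≠ some t then (st.1 + 1, some t) else (st.1, some t)

def countDistinctTriangles_alt (arr : List (List Int)) : Int :=
  let triples := PySem.List.sorted
    (arr.map (fun t => PySem.List.sorted t (fun x => x) false)) (fun x => x) false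
  (triples.foldl pvBStep (0, none)).1

-- ===== PRECONDITION & SPEC =====
def Spec_countDistinctTriangles (arr : List (List Int)) (out : Int) : Prop := out = countDistinctTriangles_alt arr
instance (arr : List (List Int)) (out : Int) : Decidable (Spec_countDistinctTriangles arr out) := by unfold Spec_countDistinctTriangles; infer_instance

-- ===== CLAIM (what is proved, stated in full; the proofs are below) =====
def Claim_equal_countDistinctTriangles : Prop := ∀ (arr : List (List Int)), Dom_countDistinctTriangles arr → Spec_countDistinctTriangles arr (countDistinctTriangles arr)

-- ===== LEMMAS AND PROOFS =====

-- insert x s = insert x (s.erase x), so their cards relate by +1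
lemma pv_card_insert (s : Finset (List Int)) (x : List Int) :
    (insert x s).card = (s.erase x).card + 1 := by
  have h : insert x s = insert x (s.erase x) := by
    ext a; simp; tauto
  rw [h, Finset.card_insert_of_notMem (Finset.notMem_erase x _)]

-- A's loop invariant: with a duplicate-free seen-list, the count reached is the
-- number of distinct normalised triples among seen plus the remaining input.
lemma pvA_inv (l : List (List Int)) :
    ∀ (seen : List (List Int)), seen.Nodup →
      (l.foldl pvAStep ((seen.length : Int), seen)).1
        = ((seen ++ l.map (fun t => PySem.List.sorted t (fun x => x) false)).toFinset.card : Int) := by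
  induction l with
  | nil =>
    intro seen hnd
    simp [List.toFinset_card_of_nodup hnd]
  | cons t l ih =>
    intro seen hnd
    by_cases hmem : PySem.List.sorted t (fun x => x) false ∈ seen
    · have : pvAStep ((seen.length : Int), seen) t = ((seen.length : Int), seen) := by
        simp [pvAStep, hmem]
      rw [List.foldl_cons, this, ih seen hnd]
      congr 1
      simp only [List.map_cons, List.toFinset_append, List.toFinset_cons]
      rw [Finset.union_insert, Finset.insert_eq_self.mpr
        (Finset.mem_union_left _ (List.mem_toFinset.mpr hmem))]
    · have hstep : pvAStep ((seen.length : Int), seen) t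
          = (((seen ++ [PySem.List.sorted t (fun x => x) false]).length : Int),
             seen ++ [PySem.List.sorted t (fun x => x) false]) := by
        simp [pvAStep, hmem]
      have hnd' : (seen ++ [PySem.List.sorted t (fun x => x) false]).Nodup := by
        simp only [List.nodup_append, List.nodup_cons, List.not_mem_nil, not_false_iff,
          List.nodup_nil, and_true, hnd, true_and]
        intro a ha hh hmemhh heq
        subst heq
        rw [List.mem_singleton] at hmemhh
        subst hmemhh
        exact hmem ha
      rw [List.foldl_cons, hstep, ih _ hnd']
      simp

-- A computes the number of distinct normalised triples.
lemma pvA_card (arr : List (List Int)) :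
    countDistinctTriangles arr
      = (((arr.map (fun t => PySem.List.sorted t (fun x => x) false)).toFinset.card : Int)) := by
  have h := pvA_inv arr [] List.nodup_nil
  simpa [countDistinctTriangles] using h

-- B's loop invariant: on a ≤-sorted tail whose elements all dominate prev,
-- the scan adds the number of distinct elements other than prev.
lemma pvB_inv (l : List (List Int)) :
    ∀ (c : Int) (p : List Int), l.Pairwise (· ≤ ·) → (∀ x ∈ l, p ≤ x) →
      (l.foldl pvBStep (c, some p)).1 = c + ((l.toFinset.erase p).card : Int) := by
  induction l with
  | nil => intro c p _ _; simp
  | cons x l ih =>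
    intro c p hpw hge
    have hx : p ≤ x := hge x (by simp)
    have hpw' := (List.pairwise_cons.mp hpw).2
    have hxl := (List.pairwise_cons.mp hpw).1
    by_cases hxp : x = p
    · subst hxp
      have : pvBStep (c, some x) x = (c, some x) := by simp [pvBStep]
      rw [List.foldl_cons, this, ih c x hpw' hxl]
      simp
    · have hlt : p < x := lt_of_le_of_ne hx (fun h => hxp h.symm)
      have hstep : pvBStep (c, some p) x = (c + 1, some x) := by
        simp [pvBStep, show ¬p = x from fun hh => hxp hh.symm]
      rw [List.foldl_cons, hstep, ih (c + 1) x hpw' hxl]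
      have hpnot : p ∉ (x :: l).toFinset := by
        simp only [List.toFinset_cons, Finset.mem_insert, List.mem_toFinset]
        rintro (h | h)
        · exact hxp h.symm
        · exact absurd (hxl p h) (not_le_of_gt hlt)
      rw [Finset.erase_eq_of_notMem hpnot]
      simp only [List.toFinset_cons]
      rw [pv_card_insert]
      push_cast
      ring

-- B's scan on any ≤-sorted list counts its distinct elements.
lemma pvB_count (l : List (List Int)) (hpw : l.Pairwise (· ≤ ·)) :
    (l.foldl pvBStep (0, none)).1 = (l.toFinset.card : Int) := by
  cases l with
  | nil => simp
  | cons h tl =>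
    have hstep : pvBStep (0, none) h = (1, some h) := by simp [pvBStep]
    have hinv := pvB_inv tl 1 h (List.pairwise_cons.mp hpw).2 (List.pairwise_cons.mp hpw).1
    rw [List.foldl_cons, hstep, hinv]
    simp only [List.toFinset_cons]
    rw [pv_card_insert]
    push_cast
    ring

-- Python's `sorted` does not depend on WHICH Decidable instance decides the
-- comparisons, only on their verdicts.
lemma pv_sorted_congr {alpha kappa : Type} (i1 i2 : LT kappa)
    (d1 : @DecidableLT kappa i1) (d2 : @DecidableLT kappa i2)
    (h : ∀ a b : kappa, @decide _ (d1 a b) = @decide _ (d2 a b))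
    (xs : List alpha) (key : alpha → kappa) :
    @PySem.List.sorted alpha kappa i1 d1 xs key false
      = @PySem.List.sorted alpha kappa i2 d2 xs key false := by
  rw [@PySem.List.sorted_eq_foldl_insertBy alpha kappa i1 d1,
      @PySem.List.sorted_eq_foldl_insertBy alpha kappa i2 d2]
  congr 1
  funext acc x
  congr 1
  funext a b
  exact h (key a) (key b)

-- The outer sort compares whole triples; Python's list comparison is the
-- lexicographic order, which on `List Int` is both core's `List.instLT` (used by
-- the port) and Mathlib's `LinearOrder` instance (used by the order lemmas);
-- this lemma bridges the two instance paths.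
lemma pv_sorted_lex (xs : List (List Int)) :
    PySem.List.sorted xs (fun x => x) false
      = @PySem.List.sorted (List Int) (List Int)
          (@Preorder.toLT (List Int) (@PartialOrder.toPreorder (List Int)
            (@LinearOrder.toPartialOrder (List Int) List.instLinearOrder)))
          (@LinearOrder.toDecidableLT (List Int) List.instLinearOrder)
          xs (fun x => x) false :=
  pv_sorted_congr _ _ _ _ (fun _ _ => decide_eq_decide.mpr Iff.rfl) xs (fun x => x)

-- B computes the number of distinct normalised triples.
lemma pvB_card (arr : List (List Int)) :
    countDistinctTriangles_alt arr
      = (((arr.map (fun t => PySem.List.sorted t (fun x => x) false)).toFinset.card : Int)) := by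
  have hpw := PySem.List.sorted_pairwise
    (arr.map (fun t => PySem.List.sorted t (fun x => x) false)) (fun x => x)
  have hperm := PySem.List.sorted_perm
    (arr.map (fun t => PySem.List.sorted t (fun x => x) false)) (fun x => x) false
  rw [pv_sorted_lex] at hperm
  have hfin := List.toFinset_eq_of_perm _ _ hperm
  show (List.foldl pvBStep (0, none) (PySem.List.sorted
      (arr.map (fun t => PySem.List.sorted t (fun x => x) false)) (fun x => x) false)).1 = _
  rw [pv_sorted_lex, pvB_count _ hpw, hfin]

-- ===== VERDICT (by name: the statement is the Claim_ definition above) =====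
theorem countDistinctTriangles_spec : Claim_equal_countDistinctTriangles := by
  intro arr _
  unfold Spec_countDistinctTriangles
  rw [pvA_card, pvB_card]
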